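-- pv_equiv track=rewrite | github.com/BogdanT05/ETFBG_SI | FebruarIspitniRok/Ispit2021/Zadatak2/func.py | compact_format
-- ===== SOURCE A (Python) =====
-- def compact_format(period):
--     compact_period = period
--     for p in range(len(period)):
--         if period[p] == "0":
--             compact_period = compact_period.replace(f"{period[p-1]}0", "")
--
--     for_removal = []
--     for c in range(0, len(compact_period)-2, 2):
--         if compact_period[c] == compact_period[c+2]:
--             for_removal.append(c+2)
--
--     final_str = ""
--     for c in range(len(compact_period)):
--         if c not in for_removal:
--             final_str += compact_period[c]
--
--     return final_str
-- ===== SOURCE B (Python) =====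
-- def compact_format(period):
--     compact = period
--     for p in range(len(period)):
--         if period[p] == "0":
--             compact = compact.replace(period[p - 1] + "0", "")
--
--     # Stream the compacted string two characters at a time, deduplicating
--     # consecutive equal first-of-pair characters (a run-dedup state machine);
--     # no removal-index table is ever built.
--     pieces = []
--     prev = None
--     for k in range(0, len(compact), 2):
--         head = compact[k:k + 2]
--         pieces.append(head if head[0] != prev else head[1:])
--         prev = head[0]
--     return "".join(pieces)
-- ===== Notes on version B (the rewrite author's own statement) =====
-- stated objective: faster
-- what changed: A builds a for_removal index table, then re-scans the string testing 'c not in for_removal' (a list scan per index) and grows the result by += ; B never builds an index table: it streams the compacted string two characters at a time as chunks, deduplicating consecutive equal chunk-head characters with a carried 'prev' state, and joins the kept pieces once.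
import Mathlib
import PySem

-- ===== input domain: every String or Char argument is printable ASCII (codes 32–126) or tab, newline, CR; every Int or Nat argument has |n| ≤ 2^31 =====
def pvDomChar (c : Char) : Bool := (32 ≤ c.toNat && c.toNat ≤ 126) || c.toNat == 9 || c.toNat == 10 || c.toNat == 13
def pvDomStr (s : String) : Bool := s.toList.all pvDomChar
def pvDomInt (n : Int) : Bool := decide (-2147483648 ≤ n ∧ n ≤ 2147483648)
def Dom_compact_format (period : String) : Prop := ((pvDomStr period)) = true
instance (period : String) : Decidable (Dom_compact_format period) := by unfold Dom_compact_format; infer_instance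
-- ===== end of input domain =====

-- B keeps A's replace phase but replaces A's removal-index table + membership filter with a
-- run-dedup state machine streaming the string two characters at a time (objective: faster).

-- ===== PORT A =====
def compact_format (period : String) : String :=
  let ps := period.toList
  let compact := (PySem.List.pyRange 0 (ps.length : Int)).foldl
    (fun comp p =>
      if PySem.List.pyGetD ps p ' ' = '0' then
        PySem.Chars.replace comp [PySem.List.pyGetD ps (p - 1) ' ', '0'] []
      else comp) ps
  let removal := (PySem.List.pyRange 0 ((compact.length : Int) - 2) 2).foldl
    (fun acc c =>
      if PySem.List.pyGetD compact c ' ' = PySem.List.pyGetD compact (c + 2) ' ' then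
        acc ++ [c + 2]
      else acc) ([] : List Int)
  let final := (PySem.List.pyRange 0 (compact.length : Int)).foldl
    (fun acc c =>
      if c ∈ removal then acc else acc ++ [PySem.List.pyGetD compact c ' ']) ([] : List Char)
  String.ofList final

-- ===== PORT B =====
def compact_format_alt (period : String) : String :=
  let ps := period.toList
  let compact := (PySem.List.pyRange 0 (ps.length : Int)).foldl
    (fun comp p =>
      if PySem.List.pyGetD ps p ' ' = '0' then
        PySem.Chars.replace comp [PySem.List.pyGetD ps (p - 1) ' ', '0'] []
      else comp) ps
  -- pieces/prev loop over chunk starts (head = compact[k:k+2]); "".join(pieces) is the flatten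
  let st := (PySem.List.pyRange 0 (compact.length : Int) 2).foldl
    (fun st k =>
      (st.1 ++ [if some (PySem.List.pyGetD (PySem.List.slice compact (some k) (some (k + 2))) 0 ' ') ≠ st.2
                then PySem.List.slice compact (some k) (some (k + 2))
                else PySem.List.slice (PySem.List.slice compact (some k) (some (k + 2))) (some 1)],
       some (PySem.List.pyGetD (PySem.List.slice compact (some k) (some (k + 2))) 0 ' ')))
    (([] : List (List Char)), (none : Option Char))
  String.ofList st.1.flatten

-- ===== PRECONDITION & SPEC =====
def Spec_compact_format (period : String) (out : String) : Prop := out = compact_format_alt period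
instance (period : String) (out : String) : Decidable (Spec_compact_format period out) := by unfold Spec_compact_format; infer_instance

-- ===== CLAIM (what is proved, stated in full; the proofs are below) =====
def Claim_equal_compact_format : Prop := ∀ (period : String), Dom_compact_format period → Spec_compact_format period (compact_format period)

-- ===== LEMMAS AND PROOFS =====

-- 'for x in l: if p(x): out.append(f(x))' with a Prop test
theorem pvFoldlKeepIf {α β : Type} (p : α → Prop) [DecidablePred p] (f : α → β)
    (l : List α) (acc : List β) :
    l.foldl (fun acc x => if p x then acc ++ [f x] else acc) acc
      = acc ++ (l.filter (fun x => decide (p x))).map f := by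
  induction l generalizing acc with
  | nil => simp
  | cons x l ih =>
    by_cases h : p x <;> simp [h, ih, List.append_assoc]

-- 'for x in l: if p(x): skip else out.append(f(x))'
theorem pvFoldlSkipIf {α β : Type} (p : α → Prop) [DecidablePred p] (f : α → β)
    (l : List α) (acc : List β) :
    l.foldl (fun acc x => if p x then acc else acc ++ [f x]) acc
      = acc ++ (l.filter (fun x => !decide (p x))).map f := by
  induction l generalizing acc with
  | nil => simp
  | cons x l ih =>
    by_cases h : p x <;> simp [h, ih, List.append_assoc]

-- membership in A's for_removal list
theorem pvMemRemoval (s : List Char) (j : Int) :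
    (j ∈ (PySem.List.pyRange 0 ((s.length : Int) - 2) 2).foldl
        (fun acc c =>
          if PySem.List.pyGetD s c ' ' = PySem.List.pyGetD s (c + 2) ' ' then
            acc ++ [c + 2]
          else acc) ([] : List Int))
      ↔ (2 ≤ j ∧ j < (s.length : Int) ∧ PySem.Int.mod j 2 = 0 ∧
          PySem.List.pyGetD s (j - 2) ' ' = PySem.List.pyGetD s j ' ') := by
  rw [pvFoldlKeepIf (fun c => PySem.List.pyGetD s c ' ' = PySem.List.pyGetD s (c + 2) ' ')
        (fun c => c + 2)]
  simp only [List.nil_append, List.mem_map, List.mem_filter,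
    PySem.List.mem_pyRange_iff_of_pos (by norm_num : (0:Int) < 2), decide_eq_true_eq,
    PySem.Int.mod, Int.fmod_eq_emod]
  constructor
  · rintro ⟨c, ⟨⟨hc0, hcb, hdvd⟩, heq⟩, rfl⟩
    refine ⟨by omega, by omega, by omega, ?_⟩
    simpa using heq
  · rintro ⟨h2, hlt, hmod, heq⟩
    refine ⟨j - 2, ⟨⟨by omega, by omega, by omega⟩, ?_⟩, by omega⟩
    simpa using heq

-- the keep-predicate of A's phase 3, as a function of the index alone
def pvKeep (s : List Char) (j : Int) : Bool :=
  !(decide ((2:Int) ≤ j) && decide (PySem.Int.mod j 2 = 0) &&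
    decide (PySem.List.pyGetD s (j - 2) ' ' = PySem.List.pyGetD s j ' '))

-- A's phases 2+3 equal one filter over the index range
theorem pvAside (s : List Char) :
    (PySem.List.pyRange 0 (s.length : Int)).foldl
        (fun acc c =>
          if c ∈ (PySem.List.pyRange 0 ((s.length : Int) - 2) 2).foldl
              (fun acc c =>
                if PySem.List.pyGetD s c ' ' = PySem.List.pyGetD s (c + 2) ' ' then
                  acc ++ [c + 2]
                else acc) ([] : List Int)
          then acc else acc ++ [PySem.List.pyGetD s c ' ']) ([] : List Char)
      = ((PySem.List.pyRange 0 (s.length : Int)).filter (pvKeep s)).map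
          (fun j => PySem.List.pyGetD s j ' ') := by
  rw [pvFoldlSkipIf _ (fun c => PySem.List.pyGetD s c ' ')]
  rw [List.nil_append]
  refine congrArg (List.map _) (List.filter_congr ?_)
  intro c hc
  rw [PySem.List.mem_pyRange_one] at hc
  simp only [pvKeep, ← decide_not, ← Bool.decide_and, decide_eq_decide, pvMemRemoval]
  constructor
  · intro h hcontra
    exact h ⟨hcontra.1.1, hc.2, hcontra.1.2, hcontra.2⟩
  · rintro h ⟨h2, _, hmod, heq⟩
    exact h ⟨⟨h2, hmod⟩, heq⟩

-- step-2 range unfolds one element at a time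
theorem pvPyRangeTwoCons (a b : Int) (h : a < b) :
    PySem.List.pyRange a b 2 = a :: PySem.List.pyRange (a + 2) b 2 := by
  rw [PySem.List.pyRange_of_pos a b (by norm_num),
      PySem.List.pyRange_of_pos (a + 2) b (by norm_num)]
  by_cases h2 : a + 2 < b
  · have hn : ((b - a + 2 - 1) / 2).toNat = ((b - (a + 2) + 2 - 1) / 2).toNat + 1 := by omega
    simp only [if_pos h, if_pos h2, hn, List.range_succ_eq_map, List.map_cons, List.map_map]
    refine congrArg₂ _ (by ring) ?_
    refine List.map_congr_left ?_
    intro k _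
    simp [Function.comp]
    ring
  · have hn : ((b - a + 2 - 1) / 2).toNat = 1 := by omega
    simp [if_pos h, if_neg h2, hn]

theorem pvPyRangeTwoNil (a b : Int) (h : b ≤ a) :
    PySem.List.pyRange a b 2 = [] := by
  rw [PySem.List.pyRange_of_pos a b (by norm_num)]
  simp [show ¬ a < b by omega]

-- B's chunk loop, flattened, equals A's filtered index range (suffix version, prev in sync)
theorem pvChunk (s : List Char) : ∀ (m k : ℕ), s.length - k = m → k % 2 = 0 →
    ∀ (prev : Option Char), (2 ≤ k → prev = some (s.getD (k - 2) ' ')) →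
    (k < 2 → prev = none) → ∀ (acc : List (List Char)),
    ((PySem.List.pyRange (k : Int) (s.length : Int) 2).foldl
        (fun st j =>
          (st.1 ++ [if some (PySem.List.pyGetD (PySem.List.slice s (some j) (some (j + 2))) 0 ' ') ≠ st.2
                    then PySem.List.slice s (some j) (some (j + 2))
                    else PySem.List.slice (PySem.List.slice s (some j) (some (j + 2))) (some 1)],
           some (PySem.List.pyGetD (PySem.List.slice s (some j) (some (j + 2))) 0 ' '))) (acc, prev)).1.flatten
      = acc.flatten ++ ((PySem.List.pyRange (k : Int) (s.length : Int)).filter (pvKeep s)).map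
          (fun j => PySem.List.pyGetD s j ' ') := by
  intro m
  induction m using Nat.strong_induction_on with
  | _ m ih =>
  intro k hm hke prev hprev2 hprev0 acc
  by_cases hk : k < s.length
  · -- unfold one chunk
    have hklt : (k : Int) < (s.length : Int) := by exact_mod_cast hk
    rw [pvPyRangeTwoCons _ _ hklt]
    have hhead : PySem.List.slice s (some (k : Int)) (some ((k : Int) + 2))
        = List.take 2 (List.drop k s) := by
      have : ((k : Int) + 2) = ((k + 2 : ℕ) : Int) := by push_cast; ring
      rw [this, PySem.List.slice_natCast]
      congr 1
      omega
    have hdrop : List.drop k s = s.getD k ' ' :: List.drop (k + 1) s := by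
      rw [List.drop_eq_getElem_cons hk, List.getD_eq_getElem s ' ' hk]
    have hh0 : PySem.List.pyGetD (List.take 2 (List.drop k s)) 0 ' ' = s.getD k ' ' := by
      rw [PySem.List.pyGetD_zero, hdrop]
      simp
    have hmodk : PySem.Int.mod (k : Int) 2 = 0 := by
      rw [(PySem.Int.mod_eq_zero_iff_dvd _ _)]
      exact ⟨(k / 2 : ℕ), by push_cast; omega⟩
    have hkeepk : pvKeep s (k : Int)
        = decide (¬ (2 ≤ k ∧ some (s.getD k ' ') = prev)) := by
      by_cases h2 : 2 ≤ k
      · have hprev := hprev2 h2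
        have hcast : ((k : Int) - 2) = ((k - 2 : ℕ) : Int) := by omega
        simp only [pvKeep, hmodk, hcast, PySem.List.pyGetD_natCast, hprev]
        simp [h2, eq_comm]
      · simp only [pvKeep]
        have h2i : ¬ ((2:Int) ≤ (k:Int)) := by exact_mod_cast h2
        simp [h2i, h2]
    have hf0 : PySem.List.pyGetD s ((k : Int)) ' ' = s.getD k ' ' :=
      PySem.List.pyGetD_natCast s k ' '
    by_cases hk1 : k + 1 < s.length
    · -- full chunk [s[k], s[k+1]]
      have hdrop1 : List.drop (k + 1) s = s.getD (k + 1) ' ' :: List.drop (k + 2) s := by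
        rw [List.drop_eq_getElem_cons hk1, List.getD_eq_getElem s ' ' hk1]
      have htake : List.take 2 (List.drop k s) = [s.getD k ' ', s.getD (k + 1) ' '] := by
        rw [hdrop, hdrop1]
        simp
      have hk1i : ((k : Int) + 1) < (s.length : Int) := by exact_mod_cast hk1
      have hf1 : PySem.List.pyGetD s ((k : Int) + 1) ' ' = s.getD (k + 1) ' ' := by
        rw [show ((k : Int) + 1) = ((k + 1 : ℕ) : Int) by push_cast; ring,
            PySem.List.pyGetD_natCast]
      have hkeep1 : pvKeep s ((k : Int) + 1) = true := by
        have hmm : PySem.Int.mod ((k : Int) + 1) 2 = 1 := by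
          rcases PySem.Int.mod_two_eq ((k : Int) + 1) with h | h
          · exfalso
            rw [PySem.Int.mod_eq_zero_iff_dvd] at h
            rcases h with ⟨c, hc⟩
            omega
          · exact h
        simp only [pvKeep, hmm]
        simp
      rw [PySem.List.pyRange_one_cons hklt, PySem.List.pyRange_one_cons hk1i]
      simp only [List.foldl_cons, hhead, hh0]
      have hstep : ((k : Int) + 1 + 1) = ((k + 2 : ℕ) : Int) := by push_cast; ring
      have hstep2 : ((k : Int) + 2) = ((k + 2 : ℕ) : Int) := by push_cast; ring
      rw [hstep, hstep2]
      rw [ih (s.length - (k + 2)) (by omega) (k + 2) rfl (by omega) (some (s.getD k ' '))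
          (fun _ => rfl) (by omega)]
      rw [List.filter_cons, List.filter_cons, hkeepk, hkeep1]
      by_cases hcond : 2 ≤ k ∧ some (s.getD k ' ') = prev
      · -- char at k removed by A; B drops head[0]
        rw [if_neg (show ¬ (some (s.getD k ' ') ≠ prev) by simpa using hcond.2)]
        rw [htake]
        rw [show PySem.List.slice [s.getD k ' ', s.getD (k + 1) ' '] (some 1)
              = [s.getD (k + 1) ' '] from by
            rw [PySem.List.slice_from _ (by norm_num)]; rfl]
        rw [if_neg (by simp only [decide_eq_true_eq, Decidable.not_not]; exact hcond), if_pos rfl]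
        rw [List.flatten_append, List.map_cons]
        simp [hf1, List.append_assoc]
      · -- char at k kept by A; B keeps the whole head
        have hbcond : some (s.getD k ' ') ≠ prev := by
          intro hkeq
          rcases Nat.lt_or_ge k 2 with h2 | h2
          · rw [hprev0 h2] at hkeq; cases hkeq
          · exact hcond ⟨h2, hkeq⟩
        rw [if_pos hbcond, htake, if_pos (by simp only [decide_eq_true_eq]; exact hcond), if_pos rfl]
        rw [List.flatten_append, List.map_cons, List.map_cons]
        simp [hf0, hf1, List.append_assoc]
    · -- last half chunk [s[k]] : k = len - 1
      have htake : List.take 2 (List.drop k s) = [s.getD k ' '] := by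
        rw [hdrop, List.drop_eq_nil_of_le (by omega)]
        simp
      rw [PySem.List.pyRange_one_cons hklt]
      have hnil1 : PySem.List.pyRange ((k : Int) + 1) (s.length : Int) = [] :=
        PySem.List.pyRange_one_eq_nil (by omega)
      have hnil2 : PySem.List.pyRange ((k : Int) + 2) (s.length : Int) 2 = [] :=
        pvPyRangeTwoNil _ _ (by omega)
      simp only [List.foldl_cons, hhead, hh0, hnil2, hnil1, List.foldl_nil]
      rw [List.filter_cons, hkeepk, List.filter_nil]
      by_cases hcond : 2 ≤ k ∧ some (s.getD k ' ') = prev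
      · rw [if_neg (show ¬ (some (s.getD k ' ') ≠ prev) by simpa using hcond.2)]
        rw [htake]
        rw [show PySem.List.slice [s.getD k ' '] (some 1) = [] from by
            rw [PySem.List.slice_from _ (by norm_num)]; rfl]
        rw [if_neg (by simp only [decide_eq_true_eq, Decidable.not_not]; exact hcond)]
        simp
      · have hbcond : some (s.getD k ' ') ≠ prev := by
          intro hkeq
          rcases Nat.lt_or_ge k 2 with h2 | h2
          · rw [hprev0 h2] at hkeq; cases hkeq
          · exact hcond ⟨h2, hkeq⟩
        rw [if_pos hbcond, htake, if_pos (by simp only [decide_eq_true_eq]; exact hcond)]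
        simp [hf0]
  · -- k ≥ len : both ranges empty
    have hge : (s.length : Int) ≤ (k : Int) := by exact_mod_cast Nat.le_of_not_lt hk
    rw [pvPyRangeTwoNil _ _ hge, PySem.List.pyRange_one_eq_nil hge]
    simp

-- both phase-2/3 computations coincide, for any intermediate string
theorem pvPhases (s : List Char) :
    (PySem.List.pyRange 0 (s.length : Int)).foldl
        (fun acc c =>
          if c ∈ (PySem.List.pyRange 0 ((s.length : Int) - 2) 2).foldl
              (fun acc c =>
                if PySem.List.pyGetD s c ' ' = PySem.List.pyGetD s (c + 2) ' ' then
                  acc ++ [c + 2]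
                else acc) ([] : List Int)
          then acc else acc ++ [PySem.List.pyGetD s c ' ']) ([] : List Char)
      = ((PySem.List.pyRange 0 (s.length : Int) 2).foldl
          (fun st j =>
            (st.1 ++ [if some (PySem.List.pyGetD (PySem.List.slice s (some j) (some (j + 2))) 0 ' ') ≠ st.2
                      then PySem.List.slice s (some j) (some (j + 2))
                      else PySem.List.slice (PySem.List.slice s (some j) (some (j + 2))) (some 1)],
             some (PySem.List.pyGetD (PySem.List.slice s (some j) (some (j + 2))) 0 ' ')))
          (([] : List (List Char)), (none : Option Char))).1.flatten := by
  rw [pvAside]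
  have h := pvChunk s s.length 0 rfl (by omega) none (by omega) (fun _ => rfl) []
  simp only [Nat.cast_zero, List.flatten_nil, List.nil_append] at h
  exact h.symm

-- ===== VERDICT (by name: the statement is the Claim_ definition above) =====
theorem compact_format_spec : Claim_equal_compact_format := by
  intro period _
  unfold Spec_compact_format compact_format compact_format_alt
  dsimp only
  exact congrArg String.ofList (pvPhases _)
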